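-- pv_equiv track=rewrite | github.com/kvkarandashev/bmapqml | bmapqml/chemxpl/modify.py | bond_dicts_match
-- ===== SOURCE A (Python) =====
-- def bond_dicts_match(frag_bond_dict1: dict, frag_bond_dict2: dict):
--     """
--     Check that two results of current_affected_bonds call in FragmentPair correspond to fragments that can be cross-coupled.
--     """
--     if len(frag_bond_dict1) != len(frag_bond_dict2):
--         return False
--     for key1, positions1 in frag_bond_dict1.items():
--         if key1 not in frag_bond_dict2:
--             return False
--         if len(positions1) != len(frag_bond_dict2[key1]):
--             return False
--     return True
-- ===== SOURCE B (Python) =====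
-- def bond_dicts_match(frag_bond_dict1: dict, frag_bond_dict2: dict):
--     sig1 = sorted((k, len(v)) for k, v in frag_bond_dict1.items())
--     sig2 = sorted((k, len(v)) for k, v in frag_bond_dict2.items())
--     return sig1 == sig2
-- ===== Notes on version B (the rewrite author's own statement) =====
-- stated objective: alternative
-- what changed: Replaces A's length guard plus early-returning membership/length loop with computing a canonical sorted signature sorted([(key, len(positions))]) for each dict and comparing the two sorted lists for equality.
import Mathlib
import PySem

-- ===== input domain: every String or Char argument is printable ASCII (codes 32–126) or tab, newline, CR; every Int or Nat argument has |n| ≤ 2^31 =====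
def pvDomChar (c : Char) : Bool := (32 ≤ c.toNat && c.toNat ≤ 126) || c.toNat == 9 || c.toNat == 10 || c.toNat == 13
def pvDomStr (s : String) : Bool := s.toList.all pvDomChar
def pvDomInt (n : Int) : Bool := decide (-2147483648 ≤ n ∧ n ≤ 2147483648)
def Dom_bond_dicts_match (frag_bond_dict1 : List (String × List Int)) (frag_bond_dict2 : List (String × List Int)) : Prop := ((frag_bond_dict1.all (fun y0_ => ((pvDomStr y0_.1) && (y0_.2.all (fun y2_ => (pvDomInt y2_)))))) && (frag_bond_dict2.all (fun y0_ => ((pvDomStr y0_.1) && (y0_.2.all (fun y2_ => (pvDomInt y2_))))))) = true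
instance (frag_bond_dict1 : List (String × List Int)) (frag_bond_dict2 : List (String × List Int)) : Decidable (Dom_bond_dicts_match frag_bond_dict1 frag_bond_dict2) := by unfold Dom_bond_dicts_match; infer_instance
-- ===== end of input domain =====

-- B replaces A's length guard plus early-returning membership/length loop by computing a canonical
-- sorted (key, count) signature of each dict and comparing the two signatures (objective: alternative).

-- ===== PORT A =====
-- the early-returning for-loop of A: for key1, positions1 in d1 check membership and length in d2
def bdmLoop (d2 : List (String × List Int)) : List (String × List Int) → Bool
  | [] => true
  | (key1, positions1) :: rest =>
    match d2.find? (fun q => q.1 == key1) with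
    | none => false
    | some q => if positions1.length ≠ q.2.length then false else bdmLoop d2 rest

def bond_dicts_match (frag_bond_dict1 : List (String × List Int)) (frag_bond_dict2 : List (String × List Int)) : Bool :=
  if frag_bond_dict1.length ≠ frag_bond_dict2.length then false
  else bdmLoop frag_bond_dict2 frag_bond_dict1

-- ===== PORT B =====
-- sorted((k, len(v)) for k, v in d.items()): sorted on tuples = PySem.List.sorted2 with fst/snd keys
def bdmSig (d : List (String × List Int)) : List (String × Int) :=
  PySem.List.sorted2 (d.map (fun p => (p.1, PySem.List.len p.2))) Prod.fst Prod.snd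

def bond_dicts_match_alt (frag_bond_dict1 : List (String × List Int)) (frag_bond_dict2 : List (String × List Int)) : Bool :=
  bdmSig frag_bond_dict1 == bdmSig frag_bond_dict2

-- ===== PRECONDITION & SPEC =====
-- Pre_ restricts each association list to distinct keys — the invariant of every Python dict, so it
-- excludes no input the Python A can actually receive (duplicate-keyed lists are not representable as dicts).
def Pre_bond_dicts_match (frag_bond_dict1 : List (String × List Int)) (frag_bond_dict2 : List (String × List Int)) : Prop :=
  (frag_bond_dict1.map Prod.fst).Nodup ∧ (frag_bond_dict2.map Prod.fst).Nodup
instance (frag_bond_dict1 : List (String × List Int)) (frag_bond_dict2 : List (String × List Int)) : Decidable (Pre_bond_dicts_match frag_bond_dict1 frag_bond_dict2) := by unfold Pre_bond_dicts_match; infer_instance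
def pvWitness_bond_dicts_match : (List (String × List Int)) × (List (String × List Int)) :=
  ([("C", [1, 2])], [("C", [3, 4])])

def Spec_bond_dicts_match (frag_bond_dict1 : List (String × List Int)) (frag_bond_dict2 : List (String × List Int)) (out : Bool) : Prop := out = bond_dicts_match_alt frag_bond_dict1 frag_bond_dict2
instance (frag_bond_dict1 : List (String × List Int)) (frag_bond_dict2 : List (String × List Int)) (out : Bool) : Decidable (Spec_bond_dicts_match frag_bond_dict1 frag_bond_dict2 out) := by unfold Spec_bond_dicts_match; infer_instance

-- ===== CLAIM (what is proved, stated in full; the proofs are below) =====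
def Claim_equal_bond_dicts_match : Prop := ∀ (frag_bond_dict1 : List (String × List Int)) (frag_bond_dict2 : List (String × List Int)), Dom_bond_dicts_match frag_bond_dict1 frag_bond_dict2 → Pre_bond_dicts_match frag_bond_dict1 frag_bond_dict2 → Spec_bond_dicts_match frag_bond_dict1 frag_bond_dict2 (bond_dicts_match frag_bond_dict1 frag_bond_dict2)

-- ===== LEMMAS AND PROOFS =====

-- the strict lexicographic comparison sorted2 uses on (String × Int) pairs with keys fst, snd
def bdmLt (a b : String × Int) : Bool :=
  decide (a.1 < b.1) || (!decide (b.1 < a.1) && decide (a.2 < b.2))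

lemma bdmLt_trans {a b c : String × Int} (h1 : bdmLt a b = true) (h2 : bdmLt b c = true) :
    bdmLt a c = true := by
  simp only [bdmLt, Bool.or_eq_true, Bool.and_eq_true, Bool.not_eq_true', decide_eq_true_eq,
    decide_eq_false_iff_not] at *
  rcases h1 with h1 | ⟨h1a, h1b⟩ <;> rcases h2 with h2 | ⟨h2a, h2b⟩
  · exact Or.inl (h1.trans h2)
  · exact Or.inl (lt_of_lt_of_le h1 (le_of_not_gt h2a))
  · exact Or.inl (lt_of_le_of_lt (le_of_not_gt h1a) h2)
  · exact Or.inr ⟨fun h => h2a (lt_of_lt_of_le h (le_of_not_gt h1a)), h1b.trans h2b⟩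

lemma bdmLt_conn {a b : String × Int} (h1 : ¬ bdmLt a b = true) (h2 : ¬ bdmLt b a = true) :
    a = b := by
  simp only [bdmLt, Bool.or_eq_true, Bool.and_eq_true, Bool.not_eq_true', decide_eq_true_eq,
    decide_eq_false_iff_not, not_or, not_and] at h1 h2
  obtain ⟨h1s, h1i⟩ := h1
  obtain ⟨h2s, h2i⟩ := h2
  have hs : a.1 = b.1 := le_antisymm (le_of_not_gt h2s) (le_of_not_gt h1s)
  have hi : a.2 = b.2 := le_antisymm (le_of_not_gt (h2i h1s)) (le_of_not_gt (h1i h2s))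
  exact Prod.ext hs hi

-- the non-strict order the sorted output is Pairwise in
def bdmLe (a b : String × Int) : Prop := ¬ bdmLt b a = true

lemma bdmLt_irrefl (a : String × Int) : ¬ bdmLt a a = true := by
  simp [bdmLt]

lemma insertBy_pairwise (x : String × Int) (ys : List (String × Int))
    (h : ys.Pairwise bdmLe) : (PySem.List.insertBy bdmLt x ys).Pairwise bdmLe := by
  induction ys with
  | nil => simp [PySem.List.insertBy, bdmLe]
  | cons y ys ih =>
    rw [List.pairwise_cons] at h
    obtain ⟨hy, hys⟩ := h
    by_cases hb : bdmLt x y = true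
    · simp only [PySem.List.insertBy, hb, if_true]
      refine List.pairwise_cons.mpr ⟨?_, List.pairwise_cons.mpr ⟨hy, hys⟩⟩
      intro z hz hzx
      rcases List.mem_cons.mp hz with rfl | hz'
      · exact bdmLt_irrefl z (bdmLt_trans hzx hb)
      · exact hy z hz' (bdmLt_trans hzx hb)
    · simp only [PySem.List.insertBy, hb]
      refine List.pairwise_cons.mpr ⟨?_, ih hys⟩
      intro z hz
      rcases (PySem.List.mem_insertBy bdmLt x z ys).mp hz with rfl | hz'
      · exact hb
      · exact hy z hz'

lemma bdmSig_pairwise (d : List (String × List Int)) : (bdmSig d).Pairwise bdmLe := by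
  unfold bdmSig PySem.List.sorted2
  simp only [if_neg (by decide : ¬ (false = true))]
  generalize d.map (fun p => (p.1, PySem.List.len p.2)) = l
  have : ∀ (l : List (String × Int)) (acc : List (String × Int)), acc.Pairwise bdmLe →
      (l.foldl (fun acc x => PySem.List.insertBy bdmLt x acc) acc).Pairwise bdmLe := by
    intro l
    induction l with
    | nil => intro acc h; simpa using h
    | cons x xs ih =>
      intro acc h
      exact ih _ (insertBy_pairwise x acc h)
  exact this l [] List.Pairwise.nil

lemma bdmSig_perm (d : List (String × List Int)) :
    (bdmSig d).Perm (d.map (fun p => (p.1, PySem.List.len p.2))) :=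
  PySem.List.sorted2_perm _ _ _ _

lemma bdmSig_eq_iff (d1 d2 : List (String × List Int)) :
    bdmSig d1 = bdmSig d2 ↔
      (d1.map (fun p => (p.1, PySem.List.len p.2))).Perm
        (d2.map (fun p => (p.1, PySem.List.len p.2))) := by
  constructor
  · intro h
    exact ((bdmSig_perm d1).symm.trans (h ▸ bdmSig_perm d2 : (bdmSig d1).Perm _))
  · intro h
    have hperm : (bdmSig d1).Perm (bdmSig d2) :=
      (bdmSig_perm d1).trans (h.trans (bdmSig_perm d2).symm)
    exact hperm.eq_of_pairwise
      (fun a b _ _ hab hba => bdmLt_conn hba hab)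
      (bdmSig_pairwise d1) (bdmSig_pairwise d2)

-- shared characterisation: lengths agree and every entry of d1 has a same-key, same-count entry in d2
def bdmChar (d1 d2 : List (String × List Int)) : Prop :=
  d1.length = d2.length ∧ ∀ p ∈ d1, ∃ q ∈ d2, q.1 = p.1 ∧ q.2.length = p.2.length

lemma bdmLoop_iff (d2 : List (String × List Int)) (hnd : (d2.map Prod.fst).Nodup) :
    ∀ l : List (String × List Int),
      bdmLoop d2 l = true ↔ ∀ p ∈ l, ∃ q ∈ d2, q.1 = p.1 ∧ q.2.length = p.2.length := by
  intro l
  induction l with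
  | nil => simp [bdmLoop]
  | cons hd tl ih =>
    obtain ⟨k, ps⟩ := hd
    simp only [bdmLoop]
    cases hfind : d2.find? (fun q => q.1 == k) with
    | none =>
      simp only [List.find?_eq_none] at hfind
      constructor
      · intro h; cases h
      · intro h
        obtain ⟨q, hq, hq1, _⟩ := h (k, ps) (by simp)
        exact absurd (by simp [hq1]) (hfind q hq)
    | some q =>
      have hq2 := List.find?_some hfind
      have hqmem := List.mem_of_find?_eq_some hfind
      simp only [beq_iff_eq] at hq2
      change (if ps.length ≠ q.2.length then false else bdmLoop d2 tl) = true ↔ _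
      by_cases hlen : ps.length = q.2.length
      · rw [if_neg (not_not_intro hlen), ih]
        constructor
        · intro h p hp
          rcases List.mem_cons.mp hp with rfl | hp'
          · exact ⟨q, hqmem, hq2, hlen.symm⟩
          · exact h p hp'
        · intro h p hp; exact h p (List.mem_cons_of_mem _ hp)
      · rw [if_pos hlen]
        simp only [Bool.false_eq_true, false_iff]
        intro h
        obtain ⟨q', hq'mem, hq'1, hq'len⟩ := h (k, ps) (by simp)
        have heq : q = q' := by
          have h1 : q.1 = q'.1 := by rw [hq2, hq'1]
          rcases List.getElem_of_mem hqmem with ⟨i, hi, rfl⟩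
          rcases List.getElem_of_mem hq'mem with ⟨j, hj, rfl⟩
          have : i = j := by
            by_contra hne
            have := List.Nodup.getElem_inj_iff (l := d2.map Prod.fst) hnd
              (i := i) (j := j) (hi := by simpa using hi) (hj := by simpa using hj)
            simp only [List.getElem_map] at this
            exact hne (this.mp h1)
          subst this; rfl
        exact hlen (by rw [heq, hq'len])

lemma bdm_a_iff (d1 d2 : List (String × List Int)) (hnd : (d2.map Prod.fst).Nodup) :
    bond_dicts_match d1 d2 = true ↔ bdmChar d1 d2 := by
  unfold bond_dicts_match bdmChar
  by_cases h : d1.length = d2.length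
  · simp [h, bdmLoop_iff d2 hnd d1]
  · simp [h]

lemma bdm_char_iff_perm (d1 d2 : List (String × List Int))
    (hnd1 : (d1.map Prod.fst).Nodup) :
    bdmChar d1 d2 ↔
      (d1.map (fun p => (p.1, PySem.List.len p.2))).Perm
        (d2.map (fun p => (p.1, PySem.List.len p.2))) := by
  unfold bdmChar
  constructor
  · rintro ⟨hlen, hall⟩
    -- nodup of the signature list of d1 (its first components are d1's keys)
    have hnds : (d1.map (fun p => (p.1, PySem.List.len p.2))).Nodup := by
      have : (d1.map (fun p => (p.1, PySem.List.len p.2))).map Prod.fst = d1.map Prod.fst := by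
        simp [List.map_map, Function.comp_def]
      exact List.Nodup.of_map Prod.fst (by rw [this]; exact hnd1)
    have hsub : (d1.map (fun p => (p.1, PySem.List.len p.2))) ⊆
        (d2.map (fun p => (p.1, PySem.List.len p.2))) := by
      intro x hx
      rcases List.mem_map.mp hx with ⟨p, hp, rfl⟩
      rcases hall p hp with ⟨q, hq, hq1, hqlen⟩
      have : ((fun p : String × List Int => (p.1, PySem.List.len p.2)) q)
          = (p.1, PySem.List.len p.2) := by
        simp [PySem.List.len, hq1, hqlen]
      exact this ▸ List.mem_map_of_mem hq
    have hsp : List.Subperm (d1.map (fun p => (p.1, PySem.List.len p.2)))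
        (d2.map (fun p => (p.1, PySem.List.len p.2))) := hnds.subperm hsub
    exact hsp.perm_of_length_le (by simp [hlen])
  · intro hperm
    constructor
    · have := hperm.length_eq; simpa using this
    · intro p hp
      have hx : (p.1, PySem.List.len p.2) ∈ d2.map (fun p => (p.1, PySem.List.len p.2)) :=
        hperm.mem_iff.mp (List.mem_map_of_mem hp)
      rcases List.mem_map.mp hx with ⟨q, hq, hq'⟩
      simp only [Prod.mk.injEq, PySem.List.len] at hq'
      exact ⟨q, hq, hq'.1, by exact_mod_cast hq'.2⟩

lemma bdm_b_iff (d1 d2 : List (String × List Int)) :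
    bond_dicts_match_alt d1 d2 = true ↔
      (d1.map (fun p => (p.1, PySem.List.len p.2))).Perm
        (d2.map (fun p => (p.1, PySem.List.len p.2))) := by
  unfold bond_dicts_match_alt
  rw [beq_iff_eq, bdmSig_eq_iff]

-- ===== VERDICT (by name: the statement is the Claim_ definition above) =====
theorem bond_dicts_match_spec : Claim_equal_bond_dicts_match := by
  intro d1 d2 _ hpre
  obtain ⟨hnd1, hnd2⟩ := hpre
  unfold Spec_bond_dicts_match
  rw [Bool.eq_iff_iff, bdm_a_iff d1 d2 hnd2, bdm_b_iff d1 d2, bdm_char_iff_perm d1 d2 hnd1]
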